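-- pv_equiv track=rewrite | github.com/ZheRuiYang/Shuilian119_ServeScheduleTools- | SSMonthlyMaker.py | f2s0
-- ===== SOURCE A (Python) =====
-- def f2s0(tbl, stuff, night):
--     # '1'在
--     if '1' in stuff:
--         for i in range(2, 6):
--             tbl[i-1][1].append(stuff[0])
--         for i in range(6, 16):
--             tbl[i-1][2].append(stuff[0])
--         for i in range(16, 26):
--             tbl[i-1][1].append(stuff[0])
--
--         for i in range(2, 6):
--             tbl[i-1][2].append(stuff[1])
--         for i in range(6, 16):
--             tbl[i-1][1].append(stuff[1])
--         for i in range(16, 26):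
--             tbl[i-1][2].append(stuff[1])
--     else:
--         # '1'不在，代理主管值宿
--         if night == stuff[0]:
--             for i in range(2, 8):
--                 tbl[i-1][1].append(stuff[0])
--             for i in range(8, 16):
--                 tbl[i-1][2].append(stuff[0])
--             for i in range(16, 26):
--                 tbl[i-1][1].append(stuff[0])
--
--             for i in range(2, 8):
--                 tbl[i-1][2].append(stuff[1])
--             for i in range(8, 16):
--                 tbl[i-1][1].append(stuff[1])
--             for i in range(16, 26):
--                 tbl[i-1][2].append(stuff[1])
--         # '1'不在，代理主管非值宿
--         if night == stuff[1]:
--             for i in range(2, 12):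
--                 tbl[i-1][1].append(stuff[0])
--             for i in range(12, 26):
--                 tbl[i-1][2].append(stuff[0])
--
--             for i in range(2, 12):
--                 tbl[i-1][2].append(stuff[1])
--             for i in range(12, 26):
--                 tbl[i-1][1].append(stuff[1])
--     return tbl
-- ===== SOURCE B (Python) =====
-- def f2s0(tbl, stuff, night):
--     # Rebuild the table functionally: compute, for each active condition, the
--     # column stuff[0] belongs to per row, and derive every cell's extra labels
--     # from (row, column) arithmetic; no in-place segment loops.
--     s0, s1 = stuff[0], stuff[1]
--     cols = []  # per active condition, the column of stuff[0] as a function of the row number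
--     if '1' in stuff:
--         cols.append(lambda i: 1 if i < 6 or i >= 16 else 2)
--     else:
--         if night == s0:
--             cols.append(lambda i: 1 if i < 8 or i >= 16 else 2)
--         if night == s1:
--             cols.append(lambda i: 1 if i < 12 else 2)
--
--     def extra(r, c):
--         if not (1 <= r <= 24 and c in (1, 2)):
--             return []
--         return [s0 if f(r + 1) == c else s1 for f in cols]
--
--     return [[cell + extra(r, c) for c, cell in enumerate(row)]
--             for r, row in enumerate(tbl)]
-- ===== Notes on version B (the rewrite author's own statement) =====
-- stated objective: alternative
-- what changed: replaces A's fourteen in-place segment append loops with a functional rebuild: each active condition becomes a row-to-column function, and the table is reconstructed in one comprehension where each cell's extra labels are computed from (row, column) arithmetic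
import Mathlib
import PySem

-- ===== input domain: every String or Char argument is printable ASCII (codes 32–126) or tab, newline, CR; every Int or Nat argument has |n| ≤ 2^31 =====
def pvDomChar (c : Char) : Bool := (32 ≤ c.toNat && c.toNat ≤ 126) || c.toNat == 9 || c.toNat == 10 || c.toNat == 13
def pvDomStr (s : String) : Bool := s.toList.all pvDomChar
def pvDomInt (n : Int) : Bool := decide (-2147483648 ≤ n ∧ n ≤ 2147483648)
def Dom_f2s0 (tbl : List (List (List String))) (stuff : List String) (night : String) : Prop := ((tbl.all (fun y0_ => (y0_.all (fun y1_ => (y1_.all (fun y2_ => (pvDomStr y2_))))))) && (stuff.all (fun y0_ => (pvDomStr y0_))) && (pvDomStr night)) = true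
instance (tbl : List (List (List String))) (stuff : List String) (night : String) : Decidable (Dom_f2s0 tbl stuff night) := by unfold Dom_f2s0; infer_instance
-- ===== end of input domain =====

set_option maxHeartbeats 1000000

-- B rebuilds the table functionally (per-condition row→column functions, one comprehension over
-- all cells) instead of A's fourteen in-place segment append loops; same return value.
-- Python A mutates tbl in place and returns it; Python B builds a fresh table: the equivalence
-- proved here is about the RETURN value only.

-- tbl[i-1][c].append(s): exact for the indices A uses (i ≥ 2, so (i-1).toNat = i-1; Python
-- raises on an out-of-range row/column, List.modify no-ops — those inputs are outside Pre_).
def pvAppend (t : List (List (List String))) (i : Int) (c : Nat) (s : String) : List (List (List String)) :=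
  t.modify (i - 1).toNat (fun row => row.modify c (fun cell => cell ++ [s]))

-- ===== PORT A =====
def f2s0 (tbl : List (List (List String))) (stuff : List String) (night : String) : List (List (List String)) :=
  let s0 := (PySem.List.pyGet? stuff 0).getD ""   -- stuff[0]; none (IndexError) excluded by Pre_
  let s1 := (PySem.List.pyGet? stuff 1).getD ""   -- stuff[1]; none (IndexError) excluded by Pre_
  if stuff.contains "1" then
    let t := (PySem.List.pyRange 2 6 1).foldl (fun t i => pvAppend t i 1 s0) tbl
    let t := (PySem.List.pyRange 6 16 1).foldl (fun t i => pvAppend t i 2 s0) t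
    let t := (PySem.List.pyRange 16 26 1).foldl (fun t i => pvAppend t i 1 s0) t
    let t := (PySem.List.pyRange 2 6 1).foldl (fun t i => pvAppend t i 2 s1) t
    let t := (PySem.List.pyRange 6 16 1).foldl (fun t i => pvAppend t i 1 s1) t
    (PySem.List.pyRange 16 26 1).foldl (fun t i => pvAppend t i 2 s1) t
  else
    let t :=
      if night = s0 then
        let t := (PySem.List.pyRange 2 8 1).foldl (fun t i => pvAppend t i 1 s0) tbl
        let t := (PySem.List.pyRange 8 16 1).foldl (fun t i => pvAppend t i 2 s0) t
        let t := (PySem.List.pyRange 16 26 1).foldl (fun t i => pvAppend t i 1 s0) t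
        let t := (PySem.List.pyRange 2 8 1).foldl (fun t i => pvAppend t i 2 s1) t
        let t := (PySem.List.pyRange 8 16 1).foldl (fun t i => pvAppend t i 1 s1) t
        (PySem.List.pyRange 16 26 1).foldl (fun t i => pvAppend t i 2 s1) t
      else tbl
    if night = s1 then
      let t := (PySem.List.pyRange 2 12 1).foldl (fun t i => pvAppend t i 1 s0) t
      let t := (PySem.List.pyRange 12 26 1).foldl (fun t i => pvAppend t i 2 s0) t
      let t := (PySem.List.pyRange 2 12 1).foldl (fun t i => pvAppend t i 2 s1) t
      (PySem.List.pyRange 12 26 1).foldl (fun t i => pvAppend t i 1 s1) t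
    else t

-- ===== PORT B =====
-- Source B's per-condition row→column functions (three- and two-segment thresholds)
def pvCol3 (b : Int) : Int → Int := fun i => if i < b ∨ 16 ≤ i then 1 else 2
def pvCol2 (b : Int) : Int → Int := fun i => if i < b then 1 else 2

def f2s0_alt (tbl : List (List (List String))) (stuff : List String) (night : String) : List (List (List String)) :=
  let s0 := (PySem.List.pyGet? stuff 0).getD ""   -- stuff[0]; none (IndexError) excluded by Pre_
  let s1 := (PySem.List.pyGet? stuff 1).getD ""
  let cols : List (Int → Int) :=
    if stuff.contains "1" then [pvCol3 6]
    else (if night = s0 then [pvCol3 8] else []) ++ (if night = s1 then [pvCol2 12] else [])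
  (PySem.List.enumerate tbl 0).map (fun p =>
    (PySem.List.enumerate p.2 0).map (fun q =>
      q.2 ++ (if 1 ≤ p.1 ∧ p.1 ≤ 24 ∧ (q.1 = 1 ∨ q.1 = 2) then
                cols.map (fun f => if f (p.1 + 1) = q.1 then s0 else s1)
              else [])))

-- ===== PRECONDITION & SPEC =====
-- Pre_ excludes exactly the inputs where Python A raises IndexError: stuff shorter than 2
-- (stuff[0]/stuff[1] are read), and — whenever any append branch fires — a table with fewer
-- than 25 rows or a row 1..24 with fewer than 3 columns.
def Pre_f2s0 (tbl : List (List (List String))) (stuff : List String) (night : String) : Prop :=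
  2 ≤ stuff.length ∧
  ((stuff.contains "1" = true ∨ night = stuff.getD 0 "" ∨ night = stuff.getD 1 "") →
    (25 ≤ tbl.length ∧ ∀ row ∈ (tbl.drop 1).take 24, 3 ≤ row.length))
instance (tbl : List (List (List String))) (stuff : List String) (night : String) : Decidable (Pre_f2s0 tbl stuff night) := by unfold Pre_f2s0; infer_instance

def pvWitness_f2s0 : List (List (List String)) × List String × String := ([], (["a", "b"], "x"))

def Spec_f2s0 (tbl : List (List (List String))) (stuff : List String) (night : String) (out : List (List (List String))) : Prop := out = f2s0_alt tbl stuff night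
instance (tbl : List (List (List String))) (stuff : List String) (night : String) (out : List (List (List String))) : Decidable (Spec_f2s0 tbl stuff night out) := by unfold Spec_f2s0; infer_instance

-- ===== CLAIM (what is proved, stated in full; the proofs are below) =====
def Claim_equal_f2s0 : Prop := ∀ (tbl : List (List (List String))) (stuff : List String) (night : String), Dom_f2s0 tbl stuff night → Pre_f2s0 tbl stuff night → Spec_f2s0 tbl stuff night (f2s0 tbl stuff night)

-- ===== LEMMAS AND PROOFS =====

-- A single append step of A, keyed by (row, column, string), and a run of such steps.
def pvApp (t : List (List (List String))) (o : Nat × Nat × String) : List (List (List String)) :=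
  t.modify o.1 (fun row => row.modify o.2.1 (fun cell => cell ++ [o.2.2]))

def pvRun (ops : List (Nat × Nat × String)) (t : List (List (List String))) : List (List (List String)) :=
  ops.foldl pvApp t

-- the strings a run of steps appends to cell (r, c), in order
def pvVals (ops : List (Nat × Nat × String)) (r c : Nat) : List String :=
  ops.filterMap (fun o => if o.1 = r ∧ o.2.1 = c then some o.2.2 else none)

-- rebuild form: every cell extended by the values the run appends to it
def pvBuild (ops : List (Nat × Nat × String)) (t : List (List (List String))) : List (List (List String)) :=
  t.mapIdx (fun r row => row.mapIdx (fun c cell => cell ++ pvVals ops r c))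

lemma pvVals_cons (o : Nat × Nat × String) (ops : List (Nat × Nat × String)) (r c : Nat) :
    pvVals (o :: ops) r c
      = (if o.1 = r ∧ o.2.1 = c then [o.2.2] else []) ++ pvVals ops r c := by
  by_cases h : o.1 = r ∧ o.2.1 = c <;> simp [pvVals, h]

lemma pvVals_append (l1 l2 : List (Nat × Nat × String)) (r c : Nat) :
    pvVals (l1 ++ l2) r c = pvVals l1 r c ++ pvVals l2 r c := by
  simp [pvVals, List.filterMap_append]

lemma pvBuild_nil (t : List (List (List String))) : pvBuild [] t = t := by
  apply List.ext_getElem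
  · simp [pvBuild]
  intro r h1 h2
  simp only [pvBuild, List.getElem_mapIdx]
  apply List.ext_getElem
  · simp
  intro c g1 g2
  simp [pvVals]

lemma pvBuild_cons (o : Nat × Nat × String) (ops : List (Nat × Nat × String))
    (t : List (List (List String))) : pvBuild (o :: ops) t = pvBuild ops (pvApp t o) := by
  apply List.ext_getElem
  · simp [pvBuild, pvApp]
  intro r h1 h2
  simp only [pvBuild, List.getElem_mapIdx]
  have hr' : r < (pvApp t o).length := by simpa [pvBuild, pvApp] using h2
  rw [show (pvApp t o)[r] = if o.1 = r then (t[r]'(by simpa [pvApp] using hr')).modify o.2.1 (fun cell => cell ++ [o.2.2]) else t[r]'(by simpa [pvApp] using hr') from by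
        simpa [pvApp] using List.getElem_modify _ o.1 t r hr']
  by_cases hrow : o.1 = r
  · rw [if_pos hrow]
    apply List.ext_getElem
    · simp
    intro c g1 g2
    have hc' : c < ((t[r]'(by simpa [pvApp] using hr')).modify o.2.1 (fun cell => cell ++ [o.2.2])).length := by
      simpa using g2
    simp only [List.getElem_mapIdx]
    rw [List.getElem_modify _ o.2.1 _ c hc', pvVals_cons]
    by_cases hcol : o.2.1 = c
    · rw [if_pos hcol, if_pos ⟨hrow, hcol⟩, List.append_assoc]
    · rw [if_neg hcol, if_neg (by exact fun h => hcol h.2)]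
      simp
  · rw [if_neg hrow]
    apply List.ext_getElem
    · simp
    intro c g1 g2
    simp only [List.getElem_mapIdx]
    rw [pvVals_cons, if_neg (by exact fun h => hrow h.1)]
    simp

-- a run of append steps IS the rebuild
lemma pvRun_eq_build (ops : List (Nat × Nat × String)) (t : List (List (List String))) :
    pvRun ops t = pvBuild ops t := by
  induction ops generalizing t with
  | nil => exact (pvBuild_nil t).symm
  | cons o l ih =>
    show pvRun l (pvApp t o) = pvBuild (o :: l) t
    rw [ih, pvBuild_cons]

lemma pvRun_append (xs ys : List (Nat × Nat × String)) (t : List (List (List String))) :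
    pvRun (xs ++ ys) t = pvRun ys (pvRun xs t) := by
  simp only [pvRun, List.foldl_append]

-- one range loop of A as a pvRun
lemma fold_to_run (c : Nat) (s : String) (is : List Int) (t : List (List (List String))) :
    is.foldl (fun t i => pvAppend t i c s) t
      = pvRun (is.map fun i => ((i - 1).toNat, c, s)) t := by
  rw [pvRun, List.foldl_map]
  rfl

-- A's op lists for the three branch shapes
def pvOps3 (b : Int) (s0 s1 : String) : List (Nat × Nat × String) :=
  ((PySem.List.pyRange 2 b 1).map fun i => ((i - 1).toNat, 1, s0))
    ++ (((PySem.List.pyRange b 16 1).map fun i => ((i - 1).toNat, 2, s0))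
    ++ (((PySem.List.pyRange 16 26 1).map fun i => ((i - 1).toNat, 1, s0))
    ++ (((PySem.List.pyRange 2 b 1).map fun i => ((i - 1).toNat, 2, s1))
    ++ (((PySem.List.pyRange b 16 1).map fun i => ((i - 1).toNat, 1, s1))
    ++ ((PySem.List.pyRange 16 26 1).map fun i => ((i - 1).toNat, 2, s1))))))

def pvOps2 (b : Int) (s0 s1 : String) : List (Nat × Nat × String) :=
  ((PySem.List.pyRange 2 b 1).map fun i => ((i - 1).toNat, 1, s0))
    ++ (((PySem.List.pyRange b 26 1).map fun i => ((i - 1).toNat, 2, s0))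
    ++ (((PySem.List.pyRange 2 b 1).map fun i => ((i - 1).toNat, 2, s1))
    ++ ((PySem.List.pyRange b 26 1).map fun i => ((i - 1).toNat, 1, s1))))

-- one segment's contribution to cell (r, c)
lemma valsSeg (c0 : Nat) (s : String) (r c : Nat) (n : Nat) :
    ∀ (a b : Int), 1 ≤ a → (b - a).toNat = n →
      pvVals ((PySem.List.pyRange a b 1).map fun i => ((i - 1).toNat, c0, s)) r c
        = if a ≤ (r : Int) + 1 ∧ (r : Int) + 1 < b ∧ c0 = c then [s] else [] := by
  induction n with
  | zero =>
    intro a b ha hn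
    rw [PySem.List.pyRange_one_eq_nil (by omega), if_neg (by omega)]
    rfl
  | succ n ih =>
    intro a b ha hn
    rw [PySem.List.pyRange_one_cons (by omega), List.map_cons, pvVals_cons,
        ih (a + 1) b (by omega) (by omega)]
    by_cases h : (a - 1).toNat = r ∧ c0 = c
    · rw [if_pos h, if_neg (by omega), if_pos (by omega)]
      rfl
    · rw [if_neg h]
      split_ifs <;> first | rfl | omega

-- three-segment branch: its per-cell values are exactly B's extra labels
lemma vals3 (b : Int) (hb2 : 2 ≤ b) (hb16 : b ≤ 16) (s0 s1 : String) (r c : Nat) :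
    pvVals (pvOps3 b s0 s1) r c
      = if 1 ≤ (r : Int) ∧ (r : Int) ≤ 24 ∧ ((c : Int) = 1 ∨ (c : Int) = 2) then
          [if pvCol3 b ((r : Int) + 1) = (c : Int) then s0 else s1]
        else [] := by
  simp only [pvOps3, pvVals_append,
    valsSeg 1 s0 r c (b - 2).toNat 2 b (by omega) (by omega),
    valsSeg 2 s0 r c (16 - b).toNat b 16 (by omega) (by omega),
    valsSeg 1 s0 r c 10 16 26 (by omega) (by omega),
    valsSeg 2 s1 r c (b - 2).toNat 2 b (by omega) (by omega),
    valsSeg 1 s1 r c (16 - b).toNat b 16 (by omega) (by omega),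
    valsSeg 2 s1 r c 10 16 26 (by omega) (by omega), pvCol3]
  split_ifs <;> first | rfl | omega

-- two-segment branch: its per-cell values are exactly B's extra labels
lemma vals2 (b : Int) (hb2 : 2 ≤ b) (hb26 : b ≤ 26) (s0 s1 : String) (r c : Nat) :
    pvVals (pvOps2 b s0 s1) r c
      = if 1 ≤ (r : Int) ∧ (r : Int) ≤ 24 ∧ ((c : Int) = 1 ∨ (c : Int) = 2) then
          [if pvCol2 b ((r : Int) + 1) = (c : Int) then s0 else s1]
        else [] := by
  simp only [pvOps2, pvVals_append,
    valsSeg 1 s0 r c (b - 2).toNat 2 b (by omega) (by omega),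
    valsSeg 2 s0 r c (26 - b).toNat b 26 (by omega) (by omega),
    valsSeg 2 s1 r c (b - 2).toNat 2 b (by omega) (by omega),
    valsSeg 1 s1 r c (26 - b).toNat b 26 (by omega) (by omega), pvCol2]
  split_ifs <;> first | rfl | omega

lemma enumMap {α β : Type} (g : Int → α → β) (l : List α) (s : Int) :
    (PySem.List.enumerate l s).map (fun p => g p.1 p.2)
      = l.mapIdx (fun k a => g (s + (k : Int)) a) := by
  induction l generalizing s with
  | nil => simp [PySem.List.enumerate_nil]
  | cons x xs ih =>
    rw [PySem.List.enumerate_cons, List.map_cons, List.mapIdx_cons, ih]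
    have : (fun (k : Nat) (a : α) => g (s + 1 + (k : Int)) a)
        = fun (k : Nat) (a : α) => g (s + ((k : Nat) + 1 : Nat)) a := by
      funext k a; congr 1; push_cast; ring
    rw [this]
    simp

lemma mapIdx_funext {α β : Type} (f g : Nat → α → β) (l : List α)
    (h : ∀ i x, f i x = g i x) : l.mapIdx f = l.mapIdx g := by
  have : f = g := by funext i x; exact h i x
  rw [this]

-- B's nested enumerate-comprehension as a nested mapIdx
lemma alt_as_build (tbl : List (List (List String))) (cols : List (Int → Int)) (s0 s1 : String) :
    ((PySem.List.enumerate tbl 0).map (fun p =>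
        (PySem.List.enumerate p.2 0).map (fun q =>
          q.2 ++ (if 1 ≤ p.1 ∧ p.1 ≤ 24 ∧ (q.1 = 1 ∨ q.1 = 2) then
                    cols.map (fun f => if f (p.1 + 1) = q.1 then s0 else s1)
                  else []))))
      = tbl.mapIdx (fun r row => row.mapIdx (fun c cell =>
          cell ++ (if 1 ≤ (r : Int) ∧ (r : Int) ≤ 24 ∧ ((c : Int) = 1 ∨ (c : Int) = 2) then
                    cols.map (fun f => if f ((r : Int) + 1) = (c : Int) then s0 else s1)
                  else []))) := by
  rw [enumMap (fun ri row => (PySem.List.enumerate row 0).map (fun q =>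
        q.2 ++ (if 1 ≤ ri ∧ ri ≤ 24 ∧ (q.1 = 1 ∨ q.1 = 2) then
                  cols.map (fun f => if f (ri + 1) = q.1 then s0 else s1)
                else []))) tbl 0]
  apply mapIdx_funext
  intro r row
  rw [enumMap (fun ci cell =>
        cell ++ (if 1 ≤ (0 + (r : Int)) ∧ (0 + (r : Int)) ≤ 24 ∧ (ci = 1 ∨ ci = 2) then
                  cols.map (fun f => if f ((0 + (r : Int)) + 1) = ci then s0 else s1)
                else [])) row 0]
  apply mapIdx_funext
  intro c cell
  norm_num

-- A's three fold-chain shapes as rebuilds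
lemma chain3 (b : Int) (s0 s1 : String) (t : List (List (List String))) :
    (PySem.List.pyRange 16 26 1).foldl (fun t i => pvAppend t i 2 s1)
     ((PySem.List.pyRange b 16 1).foldl (fun t i => pvAppend t i 1 s1)
      ((PySem.List.pyRange 2 b 1).foldl (fun t i => pvAppend t i 2 s1)
       ((PySem.List.pyRange 16 26 1).foldl (fun t i => pvAppend t i 1 s0)
        ((PySem.List.pyRange b 16 1).foldl (fun t i => pvAppend t i 2 s0)
         ((PySem.List.pyRange 2 b 1).foldl (fun t i => pvAppend t i 1 s0) t)))))
    = pvBuild (pvOps3 b s0 s1) t := by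
  rw [← pvRun_eq_build]
  simp only [pvOps3, pvRun_append, fold_to_run]

lemma chain2 (b : Int) (s0 s1 : String) (t : List (List (List String))) :
    (PySem.List.pyRange b 26 1).foldl (fun t i => pvAppend t i 1 s1)
     ((PySem.List.pyRange 2 b 1).foldl (fun t i => pvAppend t i 2 s1)
      ((PySem.List.pyRange b 26 1).foldl (fun t i => pvAppend t i 2 s0)
       ((PySem.List.pyRange 2 b 1).foldl (fun t i => pvAppend t i 1 s0) t)))
    = pvBuild (pvOps2 b s0 s1) t := by
  rw [← pvRun_eq_build]
  simp only [pvOps2, pvRun_append, fold_to_run]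

lemma pvBuild_build (ops1 ops2 : List (Nat × Nat × String)) (t : List (List (List String))) :
    pvBuild ops2 (pvBuild ops1 t) = pvBuild (ops1 ++ ops2) t := by
  rw [← pvRun_eq_build, ← pvRun_eq_build, ← pvRun_eq_build, pvRun_append]

-- ===== VERDICT (by name: the statement is the Claim_ definition above) =====
theorem f2s0_spec : Claim_equal_f2s0 := by
  intro tbl stuff night _ _
  simp only [Spec_f2s0, f2s0, f2s0_alt]
  set s0 := (PySem.List.pyGet? stuff 0).getD "" with hs0
  set s1 := (PySem.List.pyGet? stuff 1).getD "" with hs1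
  by_cases h1 : stuff.contains "1" = true
  · rw [if_pos h1, if_pos h1, chain3 6, alt_as_build, pvBuild]
    apply mapIdx_funext; intro r row
    apply mapIdx_funext; intro c cell
    rw [vals3 6 (by norm_num) (by norm_num)]
    simp only [List.map_cons, List.map_nil]
  · rw [if_neg h1, if_neg h1]
    by_cases h2 : night = s0
    · rw [if_pos h2, if_pos h2]
      by_cases h3 : night = s1
      · rw [if_pos h3, if_pos h3, chain3 8, chain2 12, pvBuild_build, alt_as_build, pvBuild]
        apply mapIdx_funext; intro r row
        apply mapIdx_funext; intro c cell
        rw [pvVals_append, vals3 8 (by norm_num) (by norm_num),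
            vals2 12 (by norm_num) (by norm_num)]
        simp only [List.cons_append, List.nil_append, List.map_cons, List.map_nil]
        split_ifs <;> simp
      · rw [if_neg h3, if_neg h3, chain3 8, alt_as_build, pvBuild]
        apply mapIdx_funext; intro r row
        apply mapIdx_funext; intro c cell
        rw [vals3 8 (by norm_num) (by norm_num)]
        simp only [List.append_nil, List.map_cons, List.map_nil]
    · rw [if_neg h2, if_neg h2]
      by_cases h3 : night = s1
      · rw [if_pos h3, if_pos h3, chain2 12, alt_as_build, pvBuild]
        apply mapIdx_funext; intro r row
        apply mapIdx_funext; intro c cell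
        rw [vals2 12 (by norm_num) (by norm_num)]
        simp only [List.nil_append, List.map_cons, List.map_nil]
      · rw [if_neg h3, if_neg h3, alt_as_build]
        conv_lhs => rw [← pvBuild_nil tbl]
        rw [pvBuild]
        apply mapIdx_funext; intro r row
        apply mapIdx_funext; intro c cell
        simp [pvVals]
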